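-- pv_equiv track=rewrite | github.com/MrBrantCode/unitest_baseline | mut_generate/mist_train_taco/taco_7147/solution.py | count_unique_insertions
-- ===== SOURCE A (Python) =====
-- def count_unique_insertions(s: str, t: str) -> int:
--     s_list = list(s)
--     t_list = list(t)
--
--     # Remove common characters from both lists
--     for char in s_list[:]:
--         if char in t_list:
--             s_list.remove(char)
--             t_list.remove(char)
--
--     # Convert remaining characters to sets
--     s_set = set(s_list)
--     t_set = set(t_list)
--
--     # Find intersection and remove from both sets
--     intersection = s_set.intersection(t_set)
--     s_set -= intersection
--     t_set -= intersection
--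
--     # If there are any characters in s_set that are not in t_set, return -1
--     if len(s_set - t_set) != 0:
--         return -1
--
--     # Otherwise, return the number of unique insertions required
--     return len(t_set - s_set)
-- ===== SOURCE B (Python) =====
-- def count_unique_insertions(s: str, t: str) -> int:
--     # Sort both strings once, then merge with two pointers over the runs of
--     # equal characters; no frequency table, no membership scans, no removals.
--     sa = sorted(s)
--     sb = sorted(t)
--     i, j, n, m = 0, 0, len(s), len(t)
--     surplus = 0
--     while i < n or j < m:
--         if i < n and (j == m or sa[i] < sb[j]):
--             # a character of s that t cannot supply (s-run exceeds t-run 0)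
--             return -1
--         if i == n or sb[j] < sa[i]:
--             # a run present only in t: one distinct surplus character
--             c = sb[j]
--             while j < m and sb[j] == c:
--                 j += 1
--             surplus += 1
--             continue
--         # equal character: compare run lengths
--         c = sa[i]
--         ka = 0
--         while i < n and sa[i] == c:
--             ka += 1
--             i += 1
--         kb = 0
--         while j < m and sb[j] == c:
--             kb += 1
--             j += 1
--         if kb < ka:
--             return -1
--         if ka < kb:
--             surplus += 1
--     return surplus
-- ===== Notes on version B (the rewrite author's own statement) =====
-- stated objective: faster
-- what changed: Replaces A's quadratic remove-common-characters loop (repeated list membership tests and list.remove calls) plus set algebra with a single two-pointer merge over the two sorted strings that compares run lengths, returning -1 on any s-surplus and counting distinct t-surplus runs.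
import Mathlib
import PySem

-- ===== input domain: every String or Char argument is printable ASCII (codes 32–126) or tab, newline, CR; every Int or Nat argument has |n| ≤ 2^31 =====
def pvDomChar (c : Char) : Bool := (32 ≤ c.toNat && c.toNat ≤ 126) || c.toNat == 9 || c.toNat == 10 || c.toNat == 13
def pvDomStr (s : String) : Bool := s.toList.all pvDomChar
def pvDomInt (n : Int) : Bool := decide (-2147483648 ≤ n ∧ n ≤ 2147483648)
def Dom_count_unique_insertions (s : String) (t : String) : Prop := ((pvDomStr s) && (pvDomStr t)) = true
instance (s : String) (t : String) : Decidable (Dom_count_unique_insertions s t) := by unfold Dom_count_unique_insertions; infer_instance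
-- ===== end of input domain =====

-- B replaces A's quadratic remove-common-characters loop and set algebra by one
-- two-pointer merge of the two sorted strings comparing run lengths (faster per
-- a timing run: O(n log n) vs O(n^2)).

-- ===== PORT A =====
-- the loop 'for char in s_list[:]: if char in t_list: s_list.remove(char); t_list.remove(char)'.
-- '.getD' is exact here: 'remove' never raises in A, since the branch just tested
-- 'char in t_list' and 'char' is always still present in s_list at that point.
def pvRemoveLoop : List Char → List Char → List Char → List Char × List Char
  | [], sl, tl => (sl, tl)
  | c :: rest, sl, tl =>
    if tl.contains c then
      pvRemoveLoop rest ((PySem.List.remove? sl c).getD sl) ((PySem.List.remove? tl c).getD tl)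
    else
      pvRemoveLoop rest sl tl

def count_unique_insertions (s : String) (t : String) : Int :=
  let res := pvRemoveLoop s.toList s.toList t.toList
  let sSet : PySem.Set Char := PySem.Set.ofList res.1
  let tSet : PySem.Set Char := PySem.Set.ofList res.2
  let inter := PySem.Set.inter sSet tSet
  let sSet2 := PySem.Set.diff sSet inter
  let tSet2 := PySem.Set.diff tSet inter
  if PySem.Set.len (PySem.Set.diff sSet2 tSet2) ≠ 0 then -1
  else PySem.Set.len (PySem.Set.diff tSet2 sSet2)

-- ===== PORT B =====
-- the two-pointer merge of Source B: the index pair (i, j) into (sa, sb) becomes the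
-- pair of list suffixes; the inner run-skipping while loops are takeWhile/dropWhile.
def pvMerge : List Char → List Char → Int → Int
  | [], [], acc => acc
  | _ :: _, [], _ => -1
  | [], y :: ys, acc => pvMerge [] (ys.dropWhile (fun c => c == y)) (acc + 1)
  | x :: xs, y :: ys, acc =>
    if x < y then -1
    else if y < x then pvMerge (x :: xs) (ys.dropWhile (fun c => c == y)) (acc + 1)
    else
      let ka := (xs.takeWhile (fun c => c == x)).length + 1
      let kb := (ys.takeWhile (fun c => c == x)).length + 1
      if kb < ka then -1
      else if ka < kb then pvMerge (xs.dropWhile (fun c => c == x)) (ys.dropWhile (fun c => c == x)) (acc + 1)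
      else pvMerge (xs.dropWhile (fun c => c == x)) (ys.dropWhile (fun c => c == x)) acc
termination_by sa sb _ => sa.length + sb.length
decreasing_by
  · have := List.length_dropWhile_le (fun c => c == y) ys
    simp; omega
  · have := List.length_dropWhile_le (fun c => c == y) ys
    simp; omega
  · have h1 := List.length_dropWhile_le (fun c => c == x) xs
    have h2 := List.length_dropWhile_le (fun c => c == x) ys
    simp; omega
  · have h1 := List.length_dropWhile_le (fun c => c == x) xs
    have h2 := List.length_dropWhile_le (fun c => c == x) ys
    simp; omega

def count_unique_insertions_alt (s : String) (t : String) : Int :=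
  pvMerge (PySem.List.sorted s.toList (fun c => c) false)
          (PySem.List.sorted t.toList (fun c => c) false) 0

-- ===== PRECONDITION & SPEC =====
def Spec_count_unique_insertions (s : String) (t : String) (out : Int) : Prop := out = count_unique_insertions_alt s t
instance (s : String) (t : String) (out : Int) : Decidable (Spec_count_unique_insertions s t out) := by unfold Spec_count_unique_insertions; infer_instance

-- ===== CLAIM (what is proved, stated in full; the proofs are below) =====
def Claim_equal_count_unique_insertions : Prop := ∀ (s : String) (t : String), Dom_count_unique_insertions s t → Spec_count_unique_insertions s t (count_unique_insertions s t)

-- ===== LEMMAS AND PROOFS =====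

lemma removeLoop_count (p : List Char) : ∀ sl tl : List Char,
    (∀ c, p.count c ≤ sl.count c) →
    ∀ c, (pvRemoveLoop p sl tl).1.count c = sl.count c - min (p.count c) (tl.count c)
       ∧ (pvRemoveLoop p sl tl).2.count c = tl.count c - min (p.count c) (tl.count c) := by
  induction p with
  | nil => intro sl tl _ c; simp [pvRemoveLoop]
  | cons a rest ih =>
    intro sl tl hyp c
    by_cases h : tl.contains a
    · have ha_tl : a ∈ tl := by simpa using h
      have ha_sl : a ∈ sl := by
        have := hyp a
        simp [List.count_cons_self] at this
        exact List.count_pos_iff.mp (by omega)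
      rw [pvRemoveLoop, if_pos h,
          PySem.List.remove?_eq_some_erase sl a ha_sl, PySem.List.remove?_eq_some_erase tl a ha_tl]
      simp only [Option.getD_some]
      have hrest : ∀ c, rest.count c ≤ (sl.erase a).count c := by
        intro c
        have h1 := hyp c
        by_cases hc : c = a
        · subst hc
          rw [List.count_erase_self]
          rw [List.count_cons_self] at h1
          omega
        · rw [List.count_erase_of_ne hc]
          rw [List.count_cons_of_ne (Ne.symm hc)] at h1
          omega
      obtain ⟨h1, h2⟩ := ih (sl.erase a) (tl.erase a) hrest c
      have hca : 0 < tl.count a := List.count_pos_iff.mpr ha_tl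
      have hsa : 0 < sl.count a := List.count_pos_iff.mpr ha_sl
      have hpc := hyp c
      rw [h1, h2]
      by_cases hc : c = a
      · subst hc
        rw [List.count_erase_self, List.count_erase_self, List.count_cons_self]
        rw [List.count_cons_self] at hpc
        constructor <;> omega
      · rw [List.count_erase_of_ne hc, List.count_erase_of_ne hc, List.count_cons_of_ne (Ne.symm hc)]
        constructor <;> omega
    · have ha_tl : a ∉ tl := by simpa using h
      have hta : tl.count a = 0 := List.count_eq_zero.mpr ha_tl
      rw [pvRemoveLoop, if_neg h]
      have hrest : ∀ c, rest.count c ≤ sl.count c := by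
        intro c
        have h1 := hyp c
        by_cases hc : c = a
        · subst hc; rw [List.count_cons_self] at h1; omega
        · rw [List.count_cons_of_ne (Ne.symm hc)] at h1; omega
      obtain ⟨h1, h2⟩ := ih sl tl hrest c
      rw [h1, h2]
      by_cases hc : c = a
      · subst hc; rw [List.count_cons_self]; constructor <;> omega
      · rw [List.count_cons_of_ne (Ne.symm hc)]
        exact ⟨rfl, rfl⟩

lemma countP_eq_of_nodup (l1 l2 : List Char) (p : Char → Bool) (h1 : l1.Nodup) (h2 : l2.Nodup)
    (hm : ∀ c, c ∈ l1 ↔ c ∈ l2) : l1.countP p = l2.countP p := by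
  rw [List.countP_eq_length_filter, List.countP_eq_length_filter]
  have hperm : (l1.filter p).Perm (l2.filter p) := by
    rw [List.perm_ext_iff_of_nodup (h1.filter p) (h2.filter p)]
    intro a
    simp only [List.mem_filter]
    exact and_congr_left fun _ => hm a
  exact hperm.length_eq

lemma run_count (y : Char) (ys : List Char) (h : (y :: ys).Pairwise (· ≤ ·)) :
    (∀ c, (y :: ys).count c =
        (if c = y then (ys.takeWhile (fun c => c == y)).length + 1 else 0)
          + (ys.dropWhile (fun c => c == y)).count c)
    ∧ y ∉ ys.dropWhile (fun c => c == y)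
    ∧ (ys.dropWhile (fun c => c == y)).Pairwise (· ≤ ·) := by
  have hys : ys.Pairwise (· ≤ ·) := h.of_cons
  have hle : ∀ b ∈ ys, y ≤ b := fun b hb => List.rel_of_pairwise_cons h hb
  have htw : ys.takeWhile (fun c => c == y) = List.replicate (ys.takeWhile (fun c => c == y)).length y := by
    apply List.eq_replicate_of_mem
    intro b hb
    have hb' := List.mem_takeWhile_imp (p := fun c => c == y) hb
    exact eq_of_beq (by simpa using hb')
  have hsplit : ys.takeWhile (fun c => c == y) ++ ys.dropWhile (fun c => c == y) = ys :=
    List.takeWhile_append_dropWhile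
  have hdwpair : (ys.dropWhile (fun c => c == y)).Pairwise (· ≤ ·) :=
    hys.sublist (List.dropWhile_sublist _)
  have hndw : y ∉ ys.dropWhile (fun c => c == y) := by
    intro hmem
    cases hdw : ys.dropWhile (fun c => c == y) with
    | nil => rw [hdw] at hmem; exact absurd hmem (List.not_mem_nil)
    | cons h' t' =>
      have hnil : ys.dropWhile (fun c => c == y) ≠ [] := by rw [hdw]; simp
      have hh' := List.head_dropWhile_not (fun c => c == y) hnil
      have hhead : (ys.dropWhile (fun c => c == y)).head hnil = h' := by simp [hdw]
      rw [hhead] at hh'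
      have hne : h' ≠ y := by simpa using hh'
      rw [hdw] at hmem
      have hpairdw := hdwpair
      rw [hdw] at hpairdw
      rcases List.mem_cons.mp hmem with rfl | hmem'
      · exact hne rfl
      · have hle1 : h' ≤ y := List.rel_of_pairwise_cons hpairdw hmem'
        have hsub : (h' :: t').Sublist ys := by rw [← hdw]; exact List.dropWhile_sublist _
        have hle2 : y ≤ h' := hle h' (hsub.subset List.mem_cons_self)
        exact hne (le_antisymm hle1 hle2)
  refine ⟨?_, hndw, hdwpair⟩
  intro c
  conv_lhs => rw [show (y :: ys).count c = (y :: (ys.takeWhile (fun c => c == y) ++ ys.dropWhile (fun c => c == y))).count c by rw [hsplit]]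
  rw [List.count_cons, List.count_append]
  conv_lhs => rw [htw]
  rw [List.count_replicate]
  by_cases hc : c = y
  · subst hc; simp; omega
  · have h1 : (y == c) = false := beq_eq_false_iff_ne.mpr (Ne.symm hc)
    have h2 : (c == y) = false := beq_eq_false_iff_ne.mpr hc
    simp [h1, hc]

lemma countP_ofList_run (y : Char) (ys : List Char) (h : (y :: ys).Pairwise (· ≤ ·)) (p : Char → Bool) :
    (PySem.Set.ofList (y :: ys)).countP p
      = (if p y then 1 else 0) + (PySem.Set.ofList (ys.dropWhile (fun c => c == y))).countP p := by
  obtain ⟨hcnt, hndw, _⟩ := run_count y ys h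
  have hmem : ∀ c, c ∈ (y :: ys) ↔ c = y ∨ c ∈ ys.dropWhile (fun c => c == y) := by
    intro c
    constructor
    · intro hc
      by_cases hcy : c = y
      · left; exact hcy
      · right
        have h0 : 0 < (y :: ys).count c := List.count_pos_iff.mpr hc
        rw [hcnt c, if_neg hcy] at h0
        exact List.count_pos_iff.mp (by omega)
    · rintro (rfl | hc)
      · exact List.mem_cons_self
      · exact List.mem_cons_of_mem _ ((List.dropWhile_sublist _).subset hc)
  have h1 : (PySem.Set.ofList (y :: ys)).countP p
      = (y :: PySem.Set.ofList (ys.dropWhile (fun c => c == y))).countP p := by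
    apply countP_eq_of_nodup _ _ p (PySem.Set.nodup_ofList _)
    · exact List.nodup_cons.mpr
        ⟨fun hmem' => hndw ((PySem.Set.mem_ofList _ _).mp hmem'), PySem.Set.nodup_ofList _⟩
    · intro c
      rw [PySem.Set.mem_ofList, hmem c, List.mem_cons, PySem.Set.mem_ofList]
  rw [h1, List.countP_cons]
  by_cases hp : p y <;> simp [hp]
  omega

lemma merge_spec : ∀ (N : Nat) (sa sb : List Char) (acc : Int), sa.length + sb.length ≤ N →
    sa.Pairwise (· ≤ ·) → sb.Pairwise (· ≤ ·) →
    pvMerge sa sb acc =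
      if sa.any (fun c => decide (sb.count c < sa.count c)) then -1
      else acc + ((PySem.Set.ofList sb).countP (fun c => decide (sa.count c < sb.count c)) : Int) := by
  intro N
  induction N with
  | zero =>
    intro sa sb acc hlen hsa hsb
    cases sa with
    | cons x xs => simp at hlen
    | nil =>
      cases sb with
      | cons y ys => simp at hlen
      | nil => simp [pvMerge, PySem.Set.ofList, PySem.Set.empty]
  | succ n ih =>
    intro sa sb acc hlen hsa hsb
    cases sa with
    | nil =>
      cases sb with
      | nil => simp [pvMerge, PySem.Set.ofList, PySem.Set.empty]
      | cons y ys =>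
        obtain ⟨hcnt, hndw, hdwp⟩ := run_count y ys hsb
        rw [pvMerge]
        rw [ih [] (ys.dropWhile (fun c => c == y)) (acc + 1)
            (by have := List.length_dropWhile_le (fun c => c == y) ys; simp at hlen ⊢; omega)
            List.Pairwise.nil hdwp]
        simp only [List.any_nil, Bool.false_eq_true, if_false]
        rw [countP_ofList_run y ys hsb]
        have hpy : decide (List.count y ([] : List Char) < List.count y (y :: ys)) = true := by
          simp [List.count_cons_self]
        have hcong : (PySem.Set.ofList (ys.dropWhile (fun c => c == y))).countP
              (fun c => decide (List.count c ([] : List Char) < List.count c (y :: ys)))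
            = (PySem.Set.ofList (ys.dropWhile (fun c => c == y))).countP
              (fun c => decide (List.count c ([] : List Char) < List.count c (ys.dropWhile (fun c => c == y)))) := by
          apply List.countP_congr
          intro c hc
          have hc' : c ∈ ys.dropWhile (fun c => c == y) := (PySem.Set.mem_ofList _ _).mp hc
          have hcy : c ≠ y := fun hcy => hndw (hcy ▸ hc')
          rw [hcnt c, if_neg hcy]
          simp
        rw [hpy, if_pos rfl, hcong]
        push_cast
        ring
    | cons x xs =>
      cases sb with
      | nil =>
        rw [pvMerge]
        have hany : (x :: xs).any (fun c => decide (List.count c ([] : List Char) < List.count c (x :: xs))) = true := by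
          apply List.any_eq_true.mpr
          exact ⟨x, List.mem_cons_self, by simp [List.count_cons_self]⟩
        rw [hany, if_pos rfl]
      | cons y ys =>
        rcases lt_trichotomy x y with hlt | heq | hgt
        · rw [pvMerge, if_pos hlt]
          have hxnot : x ∉ (y :: ys) := by
            intro hx
            rcases List.mem_cons.mp hx with rfl | hx'
            · exact lt_irrefl x hlt
            · exact absurd (List.rel_of_pairwise_cons hsb hx') (not_le.mpr hlt)
          have hany : (x :: xs).any (fun c => decide (List.count c (y :: ys) < List.count c (x :: xs))) = true := by
            apply List.any_eq_true.mpr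
            refine ⟨x, List.mem_cons_self, ?_⟩
            rw [List.count_eq_zero.mpr hxnot]
            simp [List.count_cons_self]
          rw [hany, if_pos rfl]
        · -- x = y : compare the two runs of x
          subst heq
          obtain ⟨hcntA, hndwA, hdwpA⟩ := run_count x xs hsa
          obtain ⟨hcntB, hndwB, hdwpB⟩ := run_count x ys hsb
          have hcax : (x :: xs).count x = (xs.takeWhile (fun c => c == x)).length + 1 := by
            rw [hcntA x, if_pos rfl, List.count_eq_zero.mpr hndwA]
          have hcbx : (x :: ys).count x = (ys.takeWhile (fun c => c == x)).length + 1 := by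
            rw [hcntB x, if_pos rfl, List.count_eq_zero.mpr hndwB]
          rw [pvMerge]
          simp only [lt_irrefl x, if_false]
          by_cases h1 : (ys.takeWhile (fun c => c == x)).length + 1 < (xs.takeWhile (fun c => c == x)).length + 1
          · rw [if_pos h1]
            have hany : (x :: xs).any (fun c => decide (List.count c (x :: ys) < List.count c (x :: xs))) = true := by
              apply List.any_eq_true.mpr
              refine ⟨x, List.mem_cons_self, ?_⟩
              rw [hcax, hcbx]
              simpa using h1
            rw [hany, if_pos rfl]
          · rw [if_neg h1]
            have hka : (xs.takeWhile (fun c => c == x)).length + 1 ≤ (ys.takeWhile (fun c => c == x)).length + 1 := by omega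
            have hlen' : (xs.dropWhile (fun c => c == x)).length + (ys.dropWhile (fun c => c == x)).length ≤ n := by
              have h2 := List.length_dropWhile_le (fun c => c == x) xs
              have h3 := List.length_dropWhile_le (fun c => c == x) ys
              simp at hlen
              omega
            have hmemxs : ∀ c ∈ (x :: xs), c ≠ x → c ∈ xs.dropWhile (fun c => c == x) := by
              intro c hc hcx
              rcases List.mem_cons.mp hc with rfl | hc'
              · exact absurd rfl hcx
              · rw [← List.takeWhile_append_dropWhile (p := fun c => c == x) (l := xs)] at hc'
                rcases List.mem_append.mp hc' with htw | hdw
                · have htw' := List.mem_takeWhile_imp (p := fun c => c == x) htw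
                  exact absurd (eq_of_beq (by simpa using htw')) hcx
                · exact hdw
            have hanyiff : ((x :: xs).any (fun c => decide (List.count c (x :: ys) < List.count c (x :: xs))) = true)
                ↔ ((xs.dropWhile (fun c => c == x)).any
                    (fun c => decide (List.count c (ys.dropWhile (fun c => c == x)) < List.count c (xs.dropWhile (fun c => c == x)))) = true) := by
              simp only [List.any_eq_true]
              constructor
              · rintro ⟨c, hc, hf⟩
                by_cases hcx : c = x
                · subst hcx
                  rw [hcax, hcbx] at hf
                  exact absurd (of_decide_eq_true hf) (by omega)
                · refine ⟨c, hmemxs c hc hcx, ?_⟩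
                  rw [hcntA c, if_neg hcx, hcntB c, if_neg hcx] at hf
                  simpa using hf
              · rintro ⟨c, hc, hf⟩
                have hcx : c ≠ x := fun hcx => hndwA (hcx ▸ hc)
                refine ⟨c, List.mem_cons_of_mem _ ((List.dropWhile_sublist _).subset hc), ?_⟩
                rw [hcntA c, if_neg hcx, hcntB c, if_neg hcx]
                simpa using hf
            have hany : (x :: xs).any (fun c => decide (List.count c (x :: ys) < List.count c (x :: xs)))
                = (xs.dropWhile (fun c => c == x)).any
                    (fun c => decide (List.count c (ys.dropWhile (fun c => c == x)) < List.count c (xs.dropWhile (fun c => c == x)))) := by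
              rw [Bool.eq_iff_iff]
              exact hanyiff
            have hcong : (PySem.Set.ofList (ys.dropWhile (fun c => c == x))).countP
                  (fun c => decide (List.count c (x :: xs) < List.count c (x :: ys)))
                = (PySem.Set.ofList (ys.dropWhile (fun c => c == x))).countP
                  (fun c => decide (List.count c (xs.dropWhile (fun c => c == x)) < List.count c (ys.dropWhile (fun c => c == x)))) := by
              apply List.countP_congr
              intro c hcm
              have hcm' : c ∈ ys.dropWhile (fun c => c == x) := (PySem.Set.mem_ofList _ _).mp hcm
              have hcx : c ≠ x := fun hcx => hndwB (hcx ▸ hcm')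
              rw [hcntA c, if_neg hcx, hcntB c, if_neg hcx]
              simp
            rw [countP_ofList_run x ys hsb, hcong, hcax, hcbx]
            by_cases h2 : (xs.takeWhile (fun c => c == x)).length + 1 < (ys.takeWhile (fun c => c == x)).length + 1
            · rw [if_pos h2,
                  ih (xs.dropWhile (fun c => c == x)) (ys.dropWhile (fun c => c == x)) (acc + 1) hlen' hdwpA hdwpB,
                  ← hany]
              have hpx : decide ((xs.takeWhile (fun c => c == x)).length + 1 < (ys.takeWhile (fun c => c == x)).length + 1) = true :=
                decide_eq_true h2
              rw [hpx, if_pos rfl]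
              by_cases hc : (x :: xs).any (fun c => decide (List.count c (x :: ys) < List.count c (x :: xs))) = true
              · rw [if_pos hc, if_pos hc]
              · rw [if_neg hc, if_neg hc]
                push_cast
                ring
            · rw [if_neg h2,
                  ih (xs.dropWhile (fun c => c == x)) (ys.dropWhile (fun c => c == x)) acc hlen' hdwpA hdwpB,
                  ← hany]
              have hpx : decide ((xs.takeWhile (fun c => c == x)).length + 1 < (ys.takeWhile (fun c => c == x)).length + 1) = false :=
                decide_eq_false h2
              rw [hpx]
              simp only [Bool.false_eq_true, if_false]
              by_cases hc : (x :: xs).any (fun c => decide (List.count c (x :: ys) < List.count c (x :: xs))) = true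
              · rw [if_pos hc, if_pos hc]
              · rw [if_neg hc, if_neg hc]
                push_cast
                ring
        · -- y < x : skip t's run of y, one distinct surplus
          obtain ⟨hcnt, hndw, hdwp⟩ := run_count y ys hsb
          rw [pvMerge, if_neg (not_lt.mpr (le_of_lt hgt)), if_pos hgt]
          have hylow : ∀ c ∈ (x :: xs), y < x → c ≠ y := by
            intro c hc _ hcy
            subst hcy
            rcases List.mem_cons.mp hc with rfl | hc'
            · exact lt_irrefl _ hgt
            · exact absurd (List.rel_of_pairwise_cons hsa hc') (not_le.mpr hgt)
          have hcongf : ∀ c ∈ (x :: xs),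
              (decide (List.count c (y :: ys) < List.count c (x :: xs)))
                = (decide (List.count c (ys.dropWhile (fun c => c == y)) < List.count c (x :: xs))) := by
            intro c hc
            rw [hcnt c, if_neg (hylow c hc hgt)]
            simp
          have hany : (x :: xs).any (fun c => decide (List.count c (y :: ys) < List.count c (x :: xs)))
              = (x :: xs).any (fun c => decide (List.count c (ys.dropWhile (fun c => c == y)) < List.count c (x :: xs))) := by
            rw [Bool.eq_iff_iff]
            simp only [List.any_eq_true]
            constructor
            · rintro ⟨c, hc, hf⟩
              exact ⟨c, hc, by rw [← hcongf c hc]; exact hf⟩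
            · rintro ⟨c, hc, hf⟩
              exact ⟨c, hc, by rw [hcongf c hc]; exact hf⟩
          rw [ih (x :: xs) (ys.dropWhile (fun c => c == y)) (acc + 1)
              (by have := List.length_dropWhile_le (fun c => c == y) ys; simp at hlen ⊢; omega)
              hsa hdwp]
          rw [← hany]
          by_cases hc : (x :: xs).any (fun c => decide (List.count c (y :: ys) < List.count c (x :: xs))) = true
          · rw [if_pos hc, if_pos hc]
          · rw [if_neg hc, if_neg hc]
            rw [countP_ofList_run y ys hsb]
            have hynot : y ∉ (x :: xs) := fun hy => hylow y hy hgt rfl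
            have hpy : decide (List.count y (x :: xs) < List.count y (y :: ys)) = true := by
              rw [List.count_eq_zero.mpr hynot]
              simp [List.count_cons_self]
            have hcong : (PySem.Set.ofList (ys.dropWhile (fun c => c == y))).countP
                  (fun c => decide (List.count c (x :: xs) < List.count c (y :: ys)))
                = (PySem.Set.ofList (ys.dropWhile (fun c => c == y))).countP
                  (fun c => decide (List.count c (x :: xs) < List.count c (ys.dropWhile (fun c => c == y)))) := by
              apply List.countP_congr
              intro c hcm
              have hcm' : c ∈ ys.dropWhile (fun c => c == y) := (PySem.Set.mem_ofList _ _).mp hcm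
              have hcy : c ≠ y := fun hcy => hndw (hcy ▸ hcm')
              rw [hcnt c, if_neg hcy]
              simp
            rw [hpy, if_pos rfl, hcong]
            push_cast
            ring

-- the glue: both ports compute the same count-based value
theorem glue (s t : String) : count_unique_insertions s t = count_unique_insertions_alt s t := by
  have hyp : ∀ c, (s.toList).count c ≤ (s.toList).count c := fun c => le_refl _
  have hcounts := removeLoop_count s.toList s.toList t.toList hyp
  set S := s.toList with hS
  set T := t.toList with hT
  set fs := (pvRemoveLoop S S T).1 with hfs
  set ft := (pvRemoveLoop S S T).2 with hft
  have hfsc : ∀ c, fs.count c = S.count c - min (S.count c) (T.count c) := fun c => (hcounts c).1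
  have hftc : ∀ c, ft.count c = T.count c - min (S.count c) (T.count c) := fun c => (hcounts c).2
  have hmemfs : ∀ c, c ∈ fs ↔ T.count c < S.count c := by
    intro c
    rw [← List.count_pos_iff, hfsc c]
    omega
  have hmemft : ∀ c, c ∈ ft ↔ S.count c < T.count c := by
    intro c
    rw [← List.count_pos_iff, hftc c]
    omega
  have hdisj : ∀ c, c ∈ fs → c ∉ ft := by
    intro c h1 h2
    rw [hmemfs c] at h1
    rw [hmemft c] at h2
    omega
  -- evaluate A's set algebra
  have hinter : PySem.Set.inter (PySem.Set.ofList fs) (PySem.Set.ofList ft) = [] := by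
    apply List.eq_nil_iff_forall_not_mem.mpr
    intro c hc
    obtain ⟨h1, h2⟩ := (PySem.Set.mem_inter _ _ c).mp hc
    exact hdisj c ((PySem.Set.mem_ofList _ _).mp h1) ((PySem.Set.mem_ofList _ _).mp h2)
  have hdnil : ∀ u : PySem.Set Char, PySem.Set.diff u [] = u := by
    intro u
    simp [PySem.Set.diff, PySem.Set.contains]
  have hdiff1 : PySem.Set.diff (PySem.Set.ofList fs) (PySem.Set.ofList ft) = PySem.Set.ofList fs := by
    apply List.filter_eq_self.mpr
    intro a ha
    have : a ∉ PySem.Set.ofList ft := fun hm =>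
      hdisj a ((PySem.Set.mem_ofList _ _).mp ha) ((PySem.Set.mem_ofList _ _).mp hm)
    simpa [PySem.Set.contains] using this
  have hdiff2 : PySem.Set.diff (PySem.Set.ofList ft) (PySem.Set.ofList fs) = PySem.Set.ofList ft := by
    apply List.filter_eq_self.mpr
    intro a ha
    have : a ∉ PySem.Set.ofList fs := fun hm =>
      hdisj a ((PySem.Set.mem_ofList _ _).mp hm) ((PySem.Set.mem_ofList _ _).mp ha)
    simpa [PySem.Set.contains] using this
  have hA : count_unique_insertions s t =
      if (PySem.Set.ofList fs).length ≠ 0 then -1 else ((PySem.Set.ofList ft).length : Int) := by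
    rw [count_unique_insertions]
    simp only [← hS, ← hT, ← hfs, ← hft, hinter, hdnil, hdiff1, hdiff2, PySem.Set.len]
    norm_cast
  -- evaluate B by merge_spec
  set sa := PySem.List.sorted S (fun c => c) false with hsa
  set sb := PySem.List.sorted T (fun c => c) false with hsb
  have hpa : sa.Pairwise (· ≤ ·) := PySem.List.sorted_pairwise S (fun c => c)
  have hpb : sb.Pairwise (· ≤ ·) := PySem.List.sorted_pairwise T (fun c => c)
  have hcA : ∀ c, sa.count c = S.count c := fun c => (PySem.List.sorted_perm S (fun c => c) false).count_eq c
  have hcB : ∀ c, sb.count c = T.count c := fun c => (PySem.List.sorted_perm T (fun c => c) false).count_eq c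
  have hB : count_unique_insertions_alt s t =
      if sa.any (fun c => decide (sb.count c < sa.count c)) then -1
      else 0 + ((PySem.Set.ofList sb).countP (fun c => decide (sa.count c < sb.count c)) : Int) := by
    rw [count_unique_insertions_alt]
    exact merge_spec (sa.length + sb.length) sa sb 0 (le_refl _) hpa hpb
  rw [hA, hB]
  -- the two conditions agree
  have hcond : ((PySem.Set.ofList fs).length ≠ 0) ↔ (sa.any (fun c => decide (sb.count c < sa.count c)) = true) := by
    rw [List.any_eq_true]
    constructor
    · intro hne
      have hnil : PySem.Set.ofList fs ≠ [] := fun h => hne (by rw [h]; rfl)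
      obtain ⟨c, hc⟩ := List.exists_mem_of_ne_nil _ hnil
      have hcf : c ∈ fs := (PySem.Set.mem_ofList _ _).mp hc
      have hlt : T.count c < S.count c := (hmemfs c).mp hcf
      have hcS : c ∈ S := List.count_pos_iff.mp (by omega)
      refine ⟨c, ?_, ?_⟩
      · exact ((PySem.List.sorted_perm S (fun c => c) false).mem_iff).mpr hcS
      · rw [hcA c, hcB c]
        exact decide_eq_true hlt
    · rintro ⟨c, hc, hf⟩
      rw [hcA c, hcB c] at hf
      have hlt : T.count c < S.count c := of_decide_eq_true hf
      have hcf : c ∈ fs := (hmemfs c).mpr hlt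
      intro h0
      rw [List.length_eq_zero_iff] at h0
      exact (List.eq_nil_iff_forall_not_mem.mp h0 c) ((PySem.Set.mem_ofList _ _).mpr hcf)
  by_cases hcnd : (PySem.Set.ofList fs).length ≠ 0
  · rw [if_pos hcnd, if_pos (hcond.mp hcnd)]
  · rw [if_neg hcnd]
    have hcnd' := hcond.not.mp hcnd
    rw [if_neg hcnd']
    -- the two values agree
    have hval : (PySem.Set.ofList ft).length
        = (PySem.Set.ofList sb).countP (fun c => decide (sa.count c < sb.count c)) := by
      rw [List.countP_eq_length_filter]
      apply List.Perm.length_eq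
      rw [List.perm_ext_iff_of_nodup (PySem.Set.nodup_ofList _) ((PySem.Set.nodup_ofList _).filter _)]
      intro c
      rw [PySem.Set.mem_ofList, hmemft c, List.mem_filter, PySem.Set.mem_ofList]
      constructor
      · intro hlt
        have hcT : c ∈ T := List.count_pos_iff.mp (by omega)
        refine ⟨((PySem.List.sorted_perm T (fun c => c) false).mem_iff).mpr hcT, ?_⟩
        rw [hcA c, hcB c]
        exact decide_eq_true hlt
      · rintro ⟨_, hf⟩
        rw [hcA c, hcB c] at hf
        exact of_decide_eq_true hf
    rw [hval]
    ring

-- ===== VERDICT (by name: the statement is the Claim_ definition above) =====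
theorem count_unique_insertions_spec : Claim_equal_count_unique_insertions := by
  intro s t _
  unfold Spec_count_unique_insertions
  exact glue s t
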